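-- pv_equiv track=rewrite | github.com/richardpizem-ctrl/Real-Time-MIDI-Notation | renderer_new/selection_actions.py | delete_selected_notes
-- ===== SOURCE A (Python) =====
-- from typing import List, Dict, Any, Tuple
--
-- def delete_selected_notes(
--     notes: List[Dict[str, Any]],
--     selected_indices: List[int]
-- ) -> List[Dict[str, Any]]:
--     """Vymaže noty podľa indexov. Vracia nový zoznam nôt."""
--     if not notes or not selected_indices:
--         return notes
--
--     selected_set = set(selected_indices)
--     return [n for i, n in enumerate(notes) if i not in selected_set]
-- ===== SOURCE B (Python) =====
-- from typing import List, Dict, Any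
--
-- def delete_selected_notes(
--     notes: List[Dict[str, Any]],
--     selected_indices: List[int]
-- ) -> List[Dict[str, Any]]:
--     """Vymaze noty podla indexov. Vracia novy zoznam not."""
--     if not notes or not selected_indices:
--         return notes
--
--     result = list(notes)
--     valid = {i for i in selected_indices if 0 <= i < len(notes)}
--     for i in sorted(valid, reverse=True):
--         del result[i]
--     return result
-- ===== Notes on version B (the rewrite author's own statement) =====
-- stated objective: alternative
-- what changed: B replaces A's single filtering comprehension over enumerate with copying the list, collecting the set of valid in-range positions, and deleting them from the shrinking copy in descending order.
import Mathlib
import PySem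

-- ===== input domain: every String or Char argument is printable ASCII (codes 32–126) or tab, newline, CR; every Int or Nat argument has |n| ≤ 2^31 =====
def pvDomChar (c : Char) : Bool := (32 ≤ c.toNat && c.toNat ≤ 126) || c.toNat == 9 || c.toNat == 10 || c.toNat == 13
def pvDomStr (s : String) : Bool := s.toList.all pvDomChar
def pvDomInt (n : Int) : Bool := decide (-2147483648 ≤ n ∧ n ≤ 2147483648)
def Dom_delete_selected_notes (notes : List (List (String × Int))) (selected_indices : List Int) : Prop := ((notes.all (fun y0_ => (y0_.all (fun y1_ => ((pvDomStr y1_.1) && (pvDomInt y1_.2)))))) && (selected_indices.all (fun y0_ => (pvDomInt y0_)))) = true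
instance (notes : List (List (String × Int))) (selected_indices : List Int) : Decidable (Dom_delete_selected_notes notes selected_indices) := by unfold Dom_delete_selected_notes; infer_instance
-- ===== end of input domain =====

-- B replaces A's index-set comprehension by copying the list and deleting the valid
-- target positions in descending order from the shrinking copy (objective: alternative).

-- ===== PORT A =====
def delete_selected_notes (notes : List (List (String × Int))) (selected_indices : List Int) : List (List (String × Int)) :=
  if notes = [] ∨ selected_indices = [] then notes
  else
    let selected_set : PySem.Set Int := PySem.Set.ofList selected_indices
    ((PySem.List.enumerate notes).filter (fun p => !(PySem.Set.contains selected_set p.1))).map (·.2)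

-- ===== PORT B =====
-- port of `del result[i]` for a non-negative in-range index i
def pvDelAt {α : Type} : List α → Int → List α
  | [], _ => []
  | x :: t, i => if i = 0 then t else x :: pvDelAt t (i - 1)

def delete_selected_notes_alt (notes : List (List (String × Int))) (selected_indices : List Int) : List (List (String × Int)) :=
  if notes = [] ∨ selected_indices = [] then notes
  else
    let valid : PySem.Set Int :=
      PySem.Set.ofList (selected_indices.filter (fun i => decide (0 ≤ i) && decide (i < (notes.length : Int))))
    (PySem.List.sorted valid (fun x => x) true).foldl pvDelAt notes

-- ===== PRECONDITION & SPEC =====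
def Spec_delete_selected_notes (notes : List (List (String × Int))) (selected_indices : List Int) (out : List (List (String × Int))) : Prop := out = delete_selected_notes_alt notes selected_indices
instance (notes : List (List (String × Int))) (selected_indices : List Int) (out : List (List (String × Int))) : Decidable (Spec_delete_selected_notes notes selected_indices out) := by unfold Spec_delete_selected_notes; infer_instance

-- ===== CLAIM (what is proved, stated in full; the proofs are below) =====
def Claim_equal_delete_selected_notes : Prop := ∀ (notes : List (List (String × Int))) (selected_indices : List Int), Dom_delete_selected_notes notes selected_indices → Spec_delete_selected_notes notes selected_indices (delete_selected_notes notes selected_indices)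

-- ===== LEMMAS AND PROOFS =====

-- "keep the elements whose position the predicate rejects", with the predicate shifted on recursion
def pvFilt {α : Type} : List α → (Int → Bool) → List α
  | [], _ => []
  | x :: t, p => (if p 0 then [] else [x]) ++ pvFilt t (fun i => p (i + 1))

theorem pvFilt_congr {α : Type} : ∀ (xs : List α) (p q : Int → Bool),
    (∀ i : Int, 0 ≤ i → i < xs.length → p i = q i) → pvFilt xs p = pvFilt xs q := by
  intro xs
  induction xs with
  | nil => intro p q _; rfl
  | cons x t ih =>
    intro p q h
    simp only [pvFilt]
    rw [show p 0 = q 0 from h 0 (by omega) (by simp), ih (fun i => p (i + 1)) (fun i => q (i + 1))]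
    intro i h0 hl
    exact h (i + 1) (by omega) (by simp at hl ⊢; omega)

theorem pvFilt_false {α : Type} : ∀ (xs : List α), pvFilt xs (fun _ => false) = xs := by
  intro xs
  induction xs with
  | nil => rfl
  | cons x t ih => simp only [pvFilt]; simp [ih]

theorem enum_filt {α : Type} : ∀ (xs : List α) (k : Int) (p : Int → Bool),
    ((PySem.List.enumerate xs k).filter (fun q => !(p q.1))).map Prod.snd
      = pvFilt xs (fun i => p (i + k)) := by
  intro xs
  induction xs with
  | nil => intro k p; simp [PySem.List.enumerate_nil, pvFilt]
  | cons x t ih =>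
    intro k p
    rw [PySem.List.enumerate_cons]
    simp only [pvFilt, List.filter_cons, zero_add]
    by_cases hp : p k
    · simp only [hp, Bool.not_true, Bool.false_eq_true, if_false, if_true]
      rw [ih (k + 1) p]
      apply pvFilt_congr
      intro i _ _; congr 1; omega
    · simp only [hp, Bool.not_false, Bool.false_eq_true, if_false, if_true, List.map_cons,
        List.singleton_append]
      rw [ih (k + 1) p]
      congr 1
      apply pvFilt_congr
      intro i _ _; congr 1; omega

theorem length_pvDelAt {α : Type} : ∀ (xs : List α) (j : Int), 0 ≤ j → j < xs.length →
    (pvDelAt xs j).length = xs.length - 1 := by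
  intro xs
  induction xs with
  | nil => intro j _ h; simp at h; omega
  | cons x t ih =>
    intro j h0 hl
    by_cases hj : j = 0
    · simp [pvDelAt, hj]
    · simp only [pvDelAt, if_neg hj, List.length_cons]
      rw [ih (j - 1) (by omega) (by simp at hl ⊢; omega)]
      simp at hl
      omega

theorem delAt_filt {α : Type} : ∀ (xs : List α) (j : Int) (p : Int → Bool),
    0 ≤ j → j < xs.length → (∀ i : Int, j ≤ i → p i = false) →
    pvFilt (pvDelAt xs j) p = pvFilt xs (fun i => (i == j) || p i) := by
  intro xs
  induction xs with
  | nil => intro j p _ h _; simp at h; omega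
  | cons x t ih =>
    intro j p h0 hl hz
    by_cases hj : j = 0
    · subst hj
      simp only [pvDelAt, if_true, pvFilt]
      simp only [show ((0 : Int) == 0) = true from by decide, Bool.true_or, if_true]
      apply pvFilt_congr
      intro i hi _
      rw [hz i (by omega), hz (i + 1) (by omega)]
      have : ((i + 1 : Int) == 0) = false := by
        simp only [beq_eq_false_iff_ne]; omega
      simp [this]
    · simp only [pvDelAt, if_neg hj, pvFilt]
      simp only [show ((0 : Int) == j) = false from by simp only [beq_eq_false_iff_ne]; omega,
        Bool.false_or]
      congr 1
      rw [ih (j - 1) (fun i => p (i + 1)) (by omega) (by simp at hl ⊢; omega)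
        (fun i hi => hz (i + 1) (by omega))]
      apply pvFilt_congr
      intro i _ _
      have : ((i : Int) == j - 1) = ((i + 1 : Int) == j) := by
        by_cases h : i + 1 = j
        · have : i = j - 1 := by omega
          simp [this]
        · have h2 : i ≠ j - 1 := by omega
          simp only [beq_eq_false_iff_ne.mpr h, beq_eq_false_iff_ne.mpr h2]
      simp only [this]

theorem foldl_delAt {α : Type} : ∀ (L : List Int) (xs : List α),
    (∀ i ∈ L, 0 ≤ i ∧ i < xs.length) → L.Pairwise (fun a b => b < a) →
    L.foldl pvDelAt xs = pvFilt xs (fun i => L.contains i) := by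
  intro L
  induction L with
  | nil =>
    intro xs _ _
    simp only [List.foldl_nil]
    rw [show (fun i : Int => List.contains ([] : List Int) i) = (fun _ => false) by
      funext i; simp]
    exact (pvFilt_false xs).symm
  | cons j L' ih =>
    intro xs hb hp
    obtain ⟨hj0, hjl⟩ := hb j (by simp)
    simp only [List.foldl_cons]
    have hp' : L'.Pairwise (fun a b => b < a) := hp.of_cons
    have hlt : ∀ i ∈ L', i < j := fun i hi => (List.pairwise_cons.mp hp).1 i hi
    rw [ih (pvDelAt xs j) (by
      intro i hi
      have := (hb i (by simp [hi])).1
      have h2 := hlt i hi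
      rw [length_pvDelAt xs j hj0 hjl]
      constructor
      · exact this
      · omega) hp']
    rw [delAt_filt xs j (fun i => L'.contains i) hj0 hjl (by
      intro i hi
      simp only [List.contains_eq_mem, decide_eq_false_iff_not]
      intro hmem
      have := hlt i hmem
      omega)]
    apply pvFilt_congr
    intro i _ _
    by_cases h : i = j <;> simp [List.contains_eq_mem, List.mem_cons, h]

-- ===== VERDICT (by name: the statement is the Claim_ definition above) =====
theorem delete_selected_notes_spec : Claim_equal_delete_selected_notes := by
  intro notes sel _
  unfold Spec_delete_selected_notes delete_selected_notes delete_selected_notes_alt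
  by_cases hg : notes = [] ∨ sel = []
  · simp [hg]
  · simp only [if_neg hg]
    set S : PySem.Set Int := PySem.Set.ofList sel with hS
    set valid : PySem.Set Int :=
      PySem.Set.ofList (sel.filter (fun i => decide (0 ≤ i) && decide (i < (notes.length : Int)))) with hV
    set L : List Int := PySem.List.sorted valid (fun x => x) true with hL
    -- A's comprehension is pvFilt with S-membership
    have hA : ((PySem.List.enumerate notes).filter
        (fun p => !(PySem.Set.contains S p.1))).map Prod.snd
        = pvFilt notes (fun i => PySem.Set.contains S i) := by
      rw [show (PySem.List.enumerate notes) = PySem.List.enumerate notes 0 from rfl]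
      rw [enum_filt notes 0 (fun i => PySem.Set.contains S i)]
      apply pvFilt_congr
      intro i _ _
      congr 1; omega
    -- facts about L
    have hmemL : ∀ i ∈ L, i ∈ sel ∧ 0 ≤ i ∧ i < (notes.length : Int) := by
      intro i hi
      rw [hL, PySem.List.mem_sorted] at hi
      rw [hV] at hi
      have := (PySem.Set.mem_ofList _ _).mp hi
      simp only [List.mem_filter, Bool.and_eq_true, decide_eq_true_eq] at this
      exact ⟨this.1, this.2.1, this.2.2⟩
    have hnodupL : L.Nodup := by
      rw [hL]
      exact (PySem.List.sorted_perm valid (fun x => x) true).nodup_iff.mpr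
        (PySem.Set.nodup_ofList _)
    have hdesc : L.Pairwise (fun a b => b < a) := by
      have h1 : L.Pairwise (fun a b : Int => b ≤ a) := by
        rw [hL]; exact PySem.List.sorted_pairwise_rev valid (fun x => x)
      have h2 : L.Pairwise (fun a b : Int => a ≠ b) := hnodupL
      exact (h1.and h2).imp (fun h => by omega)
    rw [hA, foldl_delAt L notes (by
      intro i hi
      have := hmemL i hi
      exact ⟨this.2.1, this.2.2⟩) hdesc]
    apply pvFilt_congr
    intro i h0 hl
    have hiff : L.contains i = true ↔ PySem.Set.contains S i = true := by
      rw [List.contains_eq_mem, decide_eq_true_eq, PySem.Set.contains_iff]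
      constructor
      · intro hi; exact (PySem.Set.mem_ofList _ _).mpr (hmemL i hi).1
      · intro hi
        rw [hL, PySem.List.mem_sorted, hV, PySem.Set.mem_ofList]
        simp only [List.mem_filter, Bool.and_eq_true, decide_eq_true_eq]
        exact ⟨(PySem.Set.mem_ofList _ _).mp hi, h0, hl⟩
    rcases Bool.eq_false_or_eq_true (L.contains i) with h | h <;>
      rcases Bool.eq_false_or_eq_true (PySem.Set.contains S i) with h' | h' <;>
      simp_all
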